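-- pv_equiv track=rewrite | github.com/inaka0303/medical_slm | data/aci_jp_cardio/admission/eval_runner/slm_client.py | _strip_think_prefix
-- ===== SOURCE A (Python) =====
-- def _strip_think_prefix(s: str) -> str:
--     s = s.lstrip(" \n\t")
--     for p in (
--         "<think>\n\n</think>\n\n",
--         "<think>\n</think>\n",
--         "<think></think>",
--         "<think>\n\n</think>",
--     ):
--         if s.startswith(p):
--             return s[len(p):].lstrip(" \n\t")
--     if s.startswith("<think>"):
--         end = s.find("</think>")
--         if end >= 0:
--             return s[end + len("</think>"):].lstrip(" \n\t")
--     return s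
-- ===== SOURCE B (Python) =====
-- import re
--
-- _THINK_RE = re.compile(r"<think>.*?</think>", re.DOTALL)
--
-- def _strip_think_prefix(s: str) -> str:
--     s = s.lstrip(" \n\t")
--     m = _THINK_RE.match(s)
--     if m:
--         return s[m.end():].lstrip(" \n\t")
--     return s
-- ===== Notes on version B (the rewrite author's own statement) =====
-- stated objective: idiomatic
-- what changed: Replaces A's four-entry startswith prefix table plus the manual find('</think>') branch with a single precompiled anchored non-greedy DOTALL regex match (the explicit prefixes are redundant special cases of the general match, proved exactly equivalent).
import Mathlib
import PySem

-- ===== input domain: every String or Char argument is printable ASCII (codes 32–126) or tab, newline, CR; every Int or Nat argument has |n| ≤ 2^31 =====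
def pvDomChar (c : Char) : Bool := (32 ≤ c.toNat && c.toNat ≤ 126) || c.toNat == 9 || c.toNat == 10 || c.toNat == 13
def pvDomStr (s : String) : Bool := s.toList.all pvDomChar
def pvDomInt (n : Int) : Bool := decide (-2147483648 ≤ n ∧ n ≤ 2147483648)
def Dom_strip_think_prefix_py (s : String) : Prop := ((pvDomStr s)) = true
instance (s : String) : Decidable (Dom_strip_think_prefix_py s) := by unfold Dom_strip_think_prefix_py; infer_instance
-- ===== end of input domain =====

-- B replaces A's four-prefix startswith table plus the manual find branch with one anchored
-- non-greedy regex match (idiomatic); the return values are proved identical on all inputs.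

-- ===== PORT A =====
-- s.lstrip(" \n\t"): exact hand port — drop leading chars from the set {' ','\n','\t'}
def pvWS (c : Char) : Bool := c == ' ' || c == '\n' || c == '\t'
def pvLstrip (cs : List Char) : List Char := cs.dropWhile pvWS

-- the 'for p in (…): if s.startswith(p): return s[len(p):].lstrip(" \n\t")' loop
def stripAGo : List (List Char) → List Char → Option (List Char)
  | [], _ => none
  | p :: ps, s =>
      if PySem.Chars.startswith s p then
        some (pvLstrip (PySem.List.slice s (some (p.length : Int)) none))
      else stripAGo ps s

def stripABody (s : List Char) : List Char :=
  match stripAGo ["<think>\n\n</think>\n\n".toList, "<think>\n</think>\n".toList,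
                  "<think></think>".toList, "<think>\n\n</think>".toList] s with
  | some r => r
  | none =>
      if PySem.Chars.startswith s "<think>".toList then
        let e := PySem.Chars.find s "</think>".toList
        if 0 ≤ e then pvLstrip (PySem.List.slice s (some (e + 8)) none) else s
      else s

def strip_think_prefix_py (s : String) : String := String.ofList (stripABody (pvLstrip s.toList))

-- ===== PORT B =====
-- re.match(r"<think>.*?</think>", s, re.DOTALL): hand port, exact — the match is anchored at 0,
-- consumes the literal "<think>", then the minimal (non-greedy, DOTALL) run of chars up to the
-- FIRST "</think>" starting at index ≥ 7; returns m.end(), or none when there is no match.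
def pvReMatchEnd? (s : List Char) : Option Nat :=
  if PySem.Chars.startswith s "<think>".toList then
    let j := PySem.Chars.find (s.drop 7) "</think>".toList
    if 0 ≤ j then some (7 + j.toNat + 8) else none
  else none

def stripBBody (s : List Char) : List Char :=
  match pvReMatchEnd? s with
  | some e => pvLstrip (s.drop e)   -- s[m.end():].lstrip(" \n\t"); e is a Nat, so the slice is a drop
  | none => s

def strip_think_prefix_py_alt (s : String) : String := String.ofList (stripBBody (pvLstrip s.toList))

-- ===== PRECONDITION & SPEC =====
def Spec_strip_think_prefix_py (s : String) (out : String) : Prop := out = strip_think_prefix_py_alt s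
instance (s : String) (out : String) : Decidable (Spec_strip_think_prefix_py s out) := by unfold Spec_strip_think_prefix_py; infer_instance

-- ===== CLAIM (what is proved, stated in full; the proofs are below) =====
def Claim_equal_strip_think_prefix_py : Prop := ∀ (s : String), Dom_strip_think_prefix_py s → Spec_strip_think_prefix_py s (strip_think_prefix_py s)

-- ===== LEMMAS AND PROOFS =====

def pvTH : List Char := ['<', 't', 'h', 'i', 'n', 'k', '>']
def pvPAT : List Char := ['<', '/', 't', 'h', 'i', 'n', 'k', '>']

-- find points at the first occurrence: the converse direction, packaged
theorem pv_find_eq_nat (s sub : List Char) (k : Nat)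
    (h1 : sub <+: s.drop k) (h2 : ∀ i, i < k → ¬ sub <+: s.drop i) :
    PySem.Chars.find s sub = (k : Int) := by
  have hin : PySem.Chars.isIn sub s = true :=
    (PySem.Chars.exists_prefix_drop_iff_isIn (sub := sub) (s := s)).mp ⟨k, h1⟩
  have hnn : 0 ≤ PySem.Chars.find s sub := by
    rw [PySem.Chars.find_nonneg_iff]
    exact (PySem.Chars.isIn_iff_infix (sub := sub) (s := s)).mp hin
  obtain ⟨hp, hmin⟩ := PySem.Chars.find_spec (s := s) (sub := sub) hnn
  have hk : (PySem.Chars.find s sub).toNat = k := by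
    rcases Nat.lt_trichotomy (PySem.Chars.find s sub).toNat k with h | h | h
    · exact absurd hp (h2 _ h)
    · exact h
    · exact absurd h1 (hmin _ h)
  omega

theorem pv_no_pat_head (r : List Char) : ∀ i, i < 7 → ¬ pvPAT <+: (pvTH ++ r).drop i := by
  intro i hi
  interval_cases i <;> simp [pvTH, pvPAT, List.cons_prefix_cons]

theorem pv_drop7 (r : List Char) (n : Nat) : (pvTH ++ r).drop (7 + n) = r.drop n := by
  have h : (7 : Nat) + n = pvTH.length + n := rfl
  rw [h, List.drop_append, List.drop_eq_nil_of_le (by simp [pvTH])]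
  simp

theorem pv_drop7' (r : List Char) (j : Nat) (hj : 7 ≤ j) : (pvTH ++ r).drop j = r.drop (j - 7) := by
  have := pv_drop7 r (j - 7)
  rwa [show 7 + (j - 7) = j from by omega] at this

theorem pv_find_th_append (r : List Char) :
    PySem.Chars.find (pvTH ++ r) pvPAT =
      if PySem.Chars.find r pvPAT = -1 then -1
      else 7 + PySem.Chars.find r pvPAT := by
  by_cases hr : PySem.Chars.find r pvPAT = -1
  · rw [if_pos hr, PySem.Chars.find_eq_neg_one_iff]
    intro hin
    have hin' : PySem.Chars.isIn pvPAT (pvTH ++ r) = true :=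
      (PySem.Chars.isIn_iff_infix _ _).mpr hin
    obtain ⟨j, hj⟩ := (PySem.Chars.exists_prefix_drop_iff_isIn (sub := pvPAT) (s := pvTH ++ r)).mpr hin'
    by_cases hj7 : j < 7
    · exact pv_no_pat_head r j hj7 hj
    · rw [pv_drop7' r j (by omega)] at hj
      exact (PySem.Chars.find_eq_neg_one_iff _ _ |>.mp hr) ((PySem.Chars.isIn_iff_infix _ _).mp
        ((PySem.Chars.exists_prefix_drop_iff_isIn (sub := pvPAT) (s := r)).mp ⟨j - 7, hj⟩))
  · have hnn : 0 ≤ PySem.Chars.find r pvPAT := by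
      have := PySem.Chars.neg_one_le_find (s := r) (sub := pvPAT)
      omega
    obtain ⟨hp, hmin⟩ := PySem.Chars.find_spec (s := r) (sub := pvPAT) hnn
    have hfind : PySem.Chars.find (pvTH ++ r) pvPAT = ((7 + (PySem.Chars.find r pvPAT).toNat : Nat) : Int) := by
      apply pv_find_eq_nat
      · rw [pv_drop7]; exact hp
      · intro i hi
        by_cases hi7 : i < 7
        · exact pv_no_pat_head r i hi7
        · rw [pv_drop7' r i (by omega)]
          exact hmin _ (by omega)
    rw [hfind, if_neg hr]
    omega

theorem pv_lstrip_nl (r : List Char) : pvLstrip ('\n' :: r) = pvLstrip r := by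
  simp [pvLstrip, List.dropWhile, pvWS]

theorem pv_find_nl2 (rest : List Char) :
    PySem.Chars.find ('\n' :: '\n' :: (pvPAT ++ rest)) pvPAT = 2 := by
  have := pv_find_eq_nat ('\n' :: '\n' :: (pvPAT ++ rest)) pvPAT 2
    (by simp) (by intro i hi; interval_cases i <;> simp [pvPAT, List.cons_prefix_cons])
  simpa using this

theorem pv_find_nl1 (rest : List Char) :
    PySem.Chars.find ('\n' :: (pvPAT ++ rest)) pvPAT = 1 := by
  have := pv_find_eq_nat ('\n' :: (pvPAT ++ rest)) pvPAT 1
    (by simp) (by intro i hi; interval_cases i <;> simp [pvPAT, List.cons_prefix_cons])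
  simpa using this

theorem pv_find_at0 (rest : List Char) :
    PySem.Chars.find (pvPAT ++ rest) pvPAT = 0 := by
  have := pv_find_eq_nat (pvPAT ++ rest) pvPAT 0 (by simp) (by intro i hi; omega)
  simpa using this

theorem pv_body_eq (t : List Char) : stripABody t = stripBBody t := by
  by_cases hTH : PySem.Chars.startswith t "<think>".toList = true
  · obtain ⟨r, rfl⟩ : ∃ r, t = '<' :: 't' :: 'h' :: 'i' :: 'n' :: 'k' :: '>' :: r := by
      obtain ⟨u, hu⟩ := (PySem.Chars.startswith_iff _ _).mp hTH
      exact ⟨u, hu.symm⟩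
    have hTH' : PySem.Chars.startswith ('<' :: 't' :: 'h' :: 'i' :: 'n' :: 'k' :: '>' :: r)
        ['<', 't', 'h', 'i', 'n', 'k', '>'] = true := hTH
    have hdrop7 : List.drop 7 ('<' :: 't' :: 'h' :: 'i' :: 'n' :: 'k' :: '>' :: r) = r := rfl
    by_cases hf : PySem.Chars.find r pvPAT = -1
    · -- no closing tag anywhere: every branch of A fails, B does not match
      have hifail : ∀ (w u : List Char),
          PySem.Chars.startswith ('<' :: 't' :: 'h' :: 'i' :: 'n' :: 'k' :: '>' :: r)
            (pvTH ++ (w ++ (pvPAT ++ u))) ≠ true := by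
        intro w u hsw
        obtain ⟨r₂, hr₂⟩ := (PySem.Chars.startswith_iff _ _).mp hsw
        have h2 : pvTH ++ (w ++ (pvPAT ++ (u ++ r₂))) = pvTH ++ r := by
          rw [show pvTH ++ (w ++ (pvPAT ++ (u ++ r₂))) = (pvTH ++ (w ++ (pvPAT ++ u))) ++ r₂ from by simp]
          exact hr₂
        have hr : r = w ++ (pvPAT ++ (u ++ r₂)) := (List.append_cancel_left h2).symm
        exact (PySem.Chars.find_eq_neg_one_iff _ _).mp hf
          (by rw [hr]; exact ⟨w, u ++ r₂, by simp⟩)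
      have h1 : PySem.Chars.startswith ('<' :: 't' :: 'h' :: 'i' :: 'n' :: 'k' :: '>' :: r)
          ['<', 't', 'h', 'i', 'n', 'k', '>', '\n', '\n', '<', '/', 't', 'h', 'i', 'n', 'k', '>', '\n', '\n'] ≠ true :=
        hifail ['\n', '\n'] ['\n', '\n']
      have h2 : PySem.Chars.startswith ('<' :: 't' :: 'h' :: 'i' :: 'n' :: 'k' :: '>' :: r)
          ['<', 't', 'h', 'i', 'n', 'k', '>', '\n', '<', '/', 't', 'h', 'i', 'n', 'k', '>', '\n'] ≠ true :=
        hifail ['\n'] ['\n']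
      have h3 : PySem.Chars.startswith ('<' :: 't' :: 'h' :: 'i' :: 'n' :: 'k' :: '>' :: r)
          ['<', 't', 'h', 'i', 'n', 'k', '>', '<', '/', 't', 'h', 'i', 'n', 'k', '>'] ≠ true :=
        hifail [] []
      have h4 : PySem.Chars.startswith ('<' :: 't' :: 'h' :: 'i' :: 'n' :: 'k' :: '>' :: r)
          ['<', 't', 'h', 'i', 'n', 'k', '>', '\n', '\n', '<', '/', 't', 'h', 'i', 'n', 'k', '>'] ≠ true :=
        hifail ['\n', '\n'] []
      have hft : PySem.Chars.find ('<' :: 't' :: 'h' :: 'i' :: 'n' :: 'k' :: '>' :: r)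
          ['<', '/', 't', 'h', 'i', 'n', 'k', '>'] = -1 := by
        have h := pv_find_th_append r
        rw [if_pos hf] at h
        exact h
      have hf' : PySem.Chars.find r ['<', '/', 't', 'h', 'i', 'n', 'k', '>'] = -1 := hf
      simp [stripABody, stripAGo, stripBBody, pvReMatchEnd?, hTH', h1, h2, h3, h4, hft, hdrop7, hf']
    · -- there is a closing tag
      have hnn : 0 ≤ PySem.Chars.find r ['<', '/', 't', 'h', 'i', 'n', 'k', '>'] := by
        have := PySem.Chars.neg_one_le_find (s := r) (sub := pvPAT)
        have h2 : PySem.Chars.find r ['<', '/', 't', 'h', 'i', 'n', 'k', '>'] = PySem.Chars.find r pvPAT := rfl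
        rw [h2]
        omega
      by_cases hp1 : PySem.Chars.startswith ('<' :: 't' :: 'h' :: 'i' :: 'n' :: 'k' :: '>' :: r)
          ['<', 't', 'h', 'i', 'n', 'k', '>', '\n', '\n', '<', '/', 't', 'h', 'i', 'n', 'k', '>', '\n', '\n'] = true
      · obtain ⟨r₂, hr₂⟩ := (PySem.Chars.startswith_iff _ _).mp hp1
        have hr : r = '\n' :: '\n' :: '<' :: '/' :: 't' :: 'h' :: 'i' :: 'n' :: 'k' :: '>' :: '\n' :: '\n' :: r₂ :=
          (List.append_cancel_left (show pvTH ++ ('\n' :: '\n' :: '<' :: '/' :: 't' :: 'h' :: 'i' :: 'n' :: 'k' :: '>' :: '\n' :: '\n' :: r₂) = pvTH ++ r from hr₂)).symm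
        subst hr
        have hfr : PySem.Chars.find
            ('\n' :: '\n' :: '<' :: '/' :: 't' :: 'h' :: 'i' :: 'n' :: 'k' :: '>' :: '\n' :: '\n' :: r₂)
            ['<', '/', 't', 'h', 'i', 'n', 'k', '>'] = 2 := pv_find_nl2 ('\n' :: '\n' :: r₂)
        have hsl : PySem.List.slice
            ('<' :: 't' :: 'h' :: 'i' :: 'n' :: 'k' :: '>' :: '\n' :: '\n' :: '<' :: '/' :: 't' :: 'h' :: 'i' :: 'n' :: 'k' :: '>' :: '\n' :: '\n' :: r₂)
            (some 19) none = r₂ := by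
          rw [PySem.List.slice_from _ (by norm_num : (0:Int) ≤ 19)]; rfl
        have hdB : List.drop 17
            ('<' :: 't' :: 'h' :: 'i' :: 'n' :: 'k' :: '>' :: '\n' :: '\n' :: '<' :: '/' :: 't' :: 'h' :: 'i' :: 'n' :: 'k' :: '>' :: '\n' :: '\n' :: r₂) = '\n' :: '\n' :: r₂ := rfl
        simp [stripABody, stripAGo, stripBBody, pvReMatchEnd?, hTH', hp1, hfr, hsl, hdB, pv_lstrip_nl]
      · by_cases hp2 : PySem.Chars.startswith ('<' :: 't' :: 'h' :: 'i' :: 'n' :: 'k' :: '>' :: r)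
            ['<', 't', 'h', 'i', 'n', 'k', '>', '\n', '<', '/', 't', 'h', 'i', 'n', 'k', '>', '\n'] = true
        · obtain ⟨r₂, hr₂⟩ := (PySem.Chars.startswith_iff _ _).mp hp2
          have hr : r = '\n' :: '<' :: '/' :: 't' :: 'h' :: 'i' :: 'n' :: 'k' :: '>' :: '\n' :: r₂ :=
            (List.append_cancel_left (show pvTH ++ ('\n' :: '<' :: '/' :: 't' :: 'h' :: 'i' :: 'n' :: 'k' :: '>' :: '\n' :: r₂) = pvTH ++ r from hr₂)).symm
          subst hr
          have hfr : PySem.Chars.find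
              ('\n' :: '<' :: '/' :: 't' :: 'h' :: 'i' :: 'n' :: 'k' :: '>' :: '\n' :: r₂)
              ['<', '/', 't', 'h', 'i', 'n', 'k', '>'] = 1 := pv_find_nl1 ('\n' :: r₂)
          have hsl : PySem.List.slice
              ('<' :: 't' :: 'h' :: 'i' :: 'n' :: 'k' :: '>' :: '\n' :: '<' :: '/' :: 't' :: 'h' :: 'i' :: 'n' :: 'k' :: '>' :: '\n' :: r₂)
              (some 17) none = r₂ := by
            rw [PySem.List.slice_from _ (by norm_num : (0:Int) ≤ 17)]; rfl
          have hdB : List.drop 16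
              ('<' :: 't' :: 'h' :: 'i' :: 'n' :: 'k' :: '>' :: '\n' :: '<' :: '/' :: 't' :: 'h' :: 'i' :: 'n' :: 'k' :: '>' :: '\n' :: r₂) = '\n' :: r₂ := rfl
          simp [stripABody, stripAGo, stripBBody, pvReMatchEnd?, hTH', hp1, hp2, hfr, hsl, hdB, pv_lstrip_nl]
        · by_cases hp3 : PySem.Chars.startswith ('<' :: 't' :: 'h' :: 'i' :: 'n' :: 'k' :: '>' :: r)
              ['<', 't', 'h', 'i', 'n', 'k', '>', '<', '/', 't', 'h', 'i', 'n', 'k', '>'] = true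
          · obtain ⟨r₂, hr₂⟩ := (PySem.Chars.startswith_iff _ _).mp hp3
            have hr : r = '<' :: '/' :: 't' :: 'h' :: 'i' :: 'n' :: 'k' :: '>' :: r₂ :=
              (List.append_cancel_left (show pvTH ++ ('<' :: '/' :: 't' :: 'h' :: 'i' :: 'n' :: 'k' :: '>' :: r₂) = pvTH ++ r from hr₂)).symm
            subst hr
            have hfr : PySem.Chars.find
                ('<' :: '/' :: 't' :: 'h' :: 'i' :: 'n' :: 'k' :: '>' :: r₂)
                ['<', '/', 't', 'h', 'i', 'n', 'k', '>'] = 0 := pv_find_at0 r₂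
            have hsl : PySem.List.slice
                ('<' :: 't' :: 'h' :: 'i' :: 'n' :: 'k' :: '>' :: '<' :: '/' :: 't' :: 'h' :: 'i' :: 'n' :: 'k' :: '>' :: r₂)
                (some 15) none = r₂ := by
              rw [PySem.List.slice_from _ (by norm_num : (0:Int) ≤ 15)]; rfl
            have hdB : List.drop 15
                ('<' :: 't' :: 'h' :: 'i' :: 'n' :: 'k' :: '>' :: '<' :: '/' :: 't' :: 'h' :: 'i' :: 'n' :: 'k' :: '>' :: r₂) = r₂ := rfl
            simp [stripABody, stripAGo, stripBBody, pvReMatchEnd?, hTH', hp1, hp2, hp3, hfr, hsl, hdB]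
          · by_cases hp4 : PySem.Chars.startswith ('<' :: 't' :: 'h' :: 'i' :: 'n' :: 'k' :: '>' :: r)
                ['<', 't', 'h', 'i', 'n', 'k', '>', '\n', '\n', '<', '/', 't', 'h', 'i', 'n', 'k', '>'] = true
            · obtain ⟨r₂, hr₂⟩ := (PySem.Chars.startswith_iff _ _).mp hp4
              have hr : r = '\n' :: '\n' :: '<' :: '/' :: 't' :: 'h' :: 'i' :: 'n' :: 'k' :: '>' :: r₂ :=
                (List.append_cancel_left (show pvTH ++ ('\n' :: '\n' :: '<' :: '/' :: 't' :: 'h' :: 'i' :: 'n' :: 'k' :: '>' :: r₂) = pvTH ++ r from hr₂)).symm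
              subst hr
              have hfr : PySem.Chars.find
                  ('\n' :: '\n' :: '<' :: '/' :: 't' :: 'h' :: 'i' :: 'n' :: 'k' :: '>' :: r₂)
                  ['<', '/', 't', 'h', 'i', 'n', 'k', '>'] = 2 := pv_find_nl2 r₂
              have hsl : PySem.List.slice
                  ('<' :: 't' :: 'h' :: 'i' :: 'n' :: 'k' :: '>' :: '\n' :: '\n' :: '<' :: '/' :: 't' :: 'h' :: 'i' :: 'n' :: 'k' :: '>' :: r₂)
                  (some 17) none = r₂ := by
                rw [PySem.List.slice_from _ (by norm_num : (0:Int) ≤ 17)]; rfl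
              have hdB : List.drop 17
                  ('<' :: 't' :: 'h' :: 'i' :: 'n' :: 'k' :: '>' :: '\n' :: '\n' :: '<' :: '/' :: 't' :: 'h' :: 'i' :: 'n' :: 'k' :: '>' :: r₂) = r₂ := rfl
              simp [stripABody, stripAGo, stripBBody, pvReMatchEnd?, hTH', hp1, hp2, hp3, hp4, hfr, hsl, hdB]
            · -- general branch of A
              have hft : PySem.Chars.find ('<' :: 't' :: 'h' :: 'i' :: 'n' :: 'k' :: '>' :: r)
                  ['<', '/', 't', 'h', 'i', 'n', 'k', '>']
                  = 7 + PySem.Chars.find r ['<', '/', 't', 'h', 'i', 'n', 'k', '>'] := by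
                have h := pv_find_th_append r
                rw [if_neg hf] at h
                exact h
              have hslice : PySem.List.slice ('<' :: 't' :: 'h' :: 'i' :: 'n' :: 'k' :: '>' :: r)
                  (some (7 + PySem.Chars.find r ['<', '/', 't', 'h', 'i', 'n', 'k', '>'] + 8)) none
                  = r.drop ((PySem.Chars.find r ['<', '/', 't', 'h', 'i', 'n', 'k', '>']).toNat + 8) := by
                rw [PySem.List.slice_from _ (by omega : (0:Int) ≤ 7 + PySem.Chars.find r ['<', '/', 't', 'h', 'i', 'n', 'k', '>'] + 8)]
                have h1 : (7 + PySem.Chars.find r ['<', '/', 't', 'h', 'i', 'n', 'k', '>'] + 8).toNat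
                    = 7 + ((PySem.Chars.find r ['<', '/', 't', 'h', 'i', 'n', 'k', '>']).toNat + 8) := by omega
                rw [h1]
                exact pv_drop7 r _
              have hdB : List.drop (7 + (PySem.Chars.find r ['<', '/', 't', 'h', 'i', 'n', 'k', '>']).toNat + 8)
                  ('<' :: 't' :: 'h' :: 'i' :: 'n' :: 'k' :: '>' :: r)
                  = r.drop ((PySem.Chars.find r ['<', '/', 't', 'h', 'i', 'n', 'k', '>']).toNat + 8) := by
                have h1 : 7 + (PySem.Chars.find r ['<', '/', 't', 'h', 'i', 'n', 'k', '>']).toNat + 8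
                    = 7 + ((PySem.Chars.find r ['<', '/', 't', 'h', 'i', 'n', 'k', '>']).toNat + 8) := by omega
                rw [h1]
                exact pv_drop7 r _
              have h0 : (0:Int) ≤ 7 + PySem.Chars.find r ['<', '/', 't', 'h', 'i', 'n', 'k', '>'] := by omega
              simp [stripABody, stripAGo, stripBBody, pvReMatchEnd?, hTH', hp1, hp2, hp3, hp4,
                hft, hslice, hdB, hnn, h0, hdrop7]
  · -- the stripped string does not start with "<think>": both return it unchanged
    have key : ∀ p : List Char, "<think>".toList <+: p → PySem.Chars.startswith t p ≠ true := by
      intro p hp hb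
      exact hTH ((PySem.Chars.startswith_iff _ _).mpr (hp.trans ((PySem.Chars.startswith_iff _ _).mp hb)))
    have k0 : PySem.Chars.startswith t ['<', 't', 'h', 'i', 'n', 'k', '>'] ≠ true :=
      key _ (by decide)
    have k1 : PySem.Chars.startswith t
        ['<', 't', 'h', 'i', 'n', 'k', '>', '\n', '\n', '<', '/', 't', 'h', 'i', 'n', 'k', '>', '\n', '\n'] ≠ true :=
      key _ (by decide)
    have k2 : PySem.Chars.startswith t
        ['<', 't', 'h', 'i', 'n', 'k', '>', '\n', '<', '/', 't', 'h', 'i', 'n', 'k', '>', '\n'] ≠ true :=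
      key _ (by decide)
    have k3 : PySem.Chars.startswith t
        ['<', 't', 'h', 'i', 'n', 'k', '>', '<', '/', 't', 'h', 'i', 'n', 'k', '>'] ≠ true :=
      key _ (by decide)
    have k4 : PySem.Chars.startswith t
        ['<', 't', 'h', 'i', 'n', 'k', '>', '\n', '\n', '<', '/', 't', 'h', 'i', 'n', 'k', '>'] ≠ true :=
      key _ (by decide)
    simp [stripABody, stripAGo, stripBBody, pvReMatchEnd?, k0, k1, k2, k3, k4]

-- ===== VERDICT (by name: the statement is the Claim_ definition above) =====
theorem strip_think_prefix_py_spec : Claim_equal_strip_think_prefix_py := by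
  intro s _
  unfold Spec_strip_think_prefix_py strip_think_prefix_py strip_think_prefix_py_alt
  rw [pv_body_eq]
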